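-- pv_equiv track=rewrite | github.com/rjovelin/CRM_POPVAR | sites_with_coverage.py | get_feature_sites
-- ===== SOURCE A (Python) =====
-- def get_feature_sites(chromo_sites, feature_coord):
--     '''
--     (dict, dict) -> dict
--     Take the dictionnary with allele counts for all sites with coverage in the
--     genome, and a dictionnary with the coordinates of a given feature
--     (ie. miRNA, piRNA, target sites etc) and return a dictionnary
--     with allele counts for the feature sites only
--     Precondition: feature_coord is in the form {chromo: [[start, end , orientation]]}
--     with positions in 0-based indices
--     '''
--
--     # create a dict to get the allele counts at feature sites
--     feature_sites = {}
--
--     # loop over chromo in feature coord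
--     for chromo in feature_coord:
--         # check that chromo is key in chromo sites
--         if chromo in chromo_sites:
--             # loop over features on that chromo
--             for i in range(len(feature_coord[chromo])):
--                 # get the positions of the feature
--                 for j in range(feature_coord[chromo][i][0], feature_coord[chromo][i][1]):
--                     # check if position is on chromo
--                     if j in chromo_sites[chromo]:
--                         # check if chromo in feature sites
--                         if chromo in feature_sites:
--                             # add pos : list coordinates pair to dict
--                             feature_sites[chromo][j] = list(chromo_sites[chromo][j])
--                         else:
--                             feature_sites[chromo] = {}
--                             feature_sites[chromo][j] = list(chromo_sites[chromo][j])
--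
--
--     return feature_sites
-- ===== SOURCE B (Python) =====
-- def get_feature_sites(chromo_sites, feature_coord):
--     # Inverted traversal: instead of walking every genomic position of every
--     # interval, sort the covered positions of each chromosome once and, per
--     # interval, pick out the covered positions lying inside its bounds; the
--     # per-chromosome sub-dict is built separately and attached only if non-empty.
--     feature_sites = {}
--     for chromo, intervals in feature_coord.items():
--         if chromo not in chromo_sites:
--             continue
--         sites = chromo_sites[chromo]
--         pos_sorted = sorted(sites)
--         out = {}
--         for iv in intervals:
--             s, e = iv[0], iv[1]
--             for j in pos_sorted:
--                 if s <= j < e: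
--                     out[j] = list(sites[j])
--         if out:
--             feature_sites[chromo] = out
--     return feature_sites
-- ===== Notes on version B (the rewrite author's own statement) =====
-- stated objective: faster
-- what changed: B inverts the traversal: instead of walking every genomic position of every feature interval and probing the coverage dict, it sorts each chromosome's covered positions once and, per interval, selects the covered positions inside the interval bounds, building the per-chromosome sub-dict separately and attaching it only when non-empty; work no longer grows with the genomic span of the intervals, only with the number of covered positions.
-- outside the precondition, e.g. on get_feature_sites({'c1': {0: [1]}}, {'c1': [[2]]}): A raises IndexError, B raises IndexError
import Mathlib
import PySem

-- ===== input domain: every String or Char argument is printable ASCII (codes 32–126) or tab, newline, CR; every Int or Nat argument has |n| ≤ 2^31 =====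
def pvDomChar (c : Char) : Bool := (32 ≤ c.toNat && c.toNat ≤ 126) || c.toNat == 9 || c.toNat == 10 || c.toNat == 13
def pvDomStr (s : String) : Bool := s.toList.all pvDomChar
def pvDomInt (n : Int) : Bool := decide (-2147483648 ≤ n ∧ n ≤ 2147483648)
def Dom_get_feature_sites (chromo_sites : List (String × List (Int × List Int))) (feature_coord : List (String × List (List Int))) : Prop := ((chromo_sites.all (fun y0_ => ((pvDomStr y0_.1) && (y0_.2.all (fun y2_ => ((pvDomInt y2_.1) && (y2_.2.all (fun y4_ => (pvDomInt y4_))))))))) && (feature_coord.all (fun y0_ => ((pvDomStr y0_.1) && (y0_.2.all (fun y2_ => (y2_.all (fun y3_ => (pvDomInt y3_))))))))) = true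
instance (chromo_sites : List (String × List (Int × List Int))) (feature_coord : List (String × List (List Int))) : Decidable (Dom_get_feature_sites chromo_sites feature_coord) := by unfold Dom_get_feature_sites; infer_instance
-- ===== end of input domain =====

-- B inverts the traversal: it walks the (sorted) covered positions of each chromosome per
-- interval instead of walking every genomic position of every interval (objective: alternative).

-- ===== PORT A =====
-- Literal transliteration of A: loop over feature_coord keys, guard on membership in
-- chromo_sites, index the interval list by range(len(..)), walk range(start, end) and
-- test each position against the per-chromo site dict; nested dicts are PySem.Dict,
-- converted back to association lists at the end.
def get_feature_sites (chromo_sites : List (String × List (Int × List Int))) (feature_coord : List (String × List (List Int))) : List (String × List (Int × List Int)) :=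
  let csd : PySem.Dict String (List (Int × List Int)) := PySem.Dict.mk chromo_sites
  let fcd : PySem.Dict String (List (List Int)) := PySem.Dict.mk feature_coord
  let res : PySem.Dict String (PySem.Dict Int (List Int)) :=
    fcd.keys.foldl (fun fs chromo =>
      if csd.contains chromo then
        let feats := fcd.getD chromo []
        (PySem.List.pyRange 0 (PySem.List.len feats) 1).foldl (fun fs i =>
          let iv := PySem.List.pyGetD feats i []
          (PySem.List.pyRange (PySem.List.pyGetD iv 0 0) (PySem.List.pyGetD iv 1 0) 1).foldl (fun fs j =>
            let sites : PySem.Dict Int (List Int) := PySem.Dict.mk (csd.getD chromo [])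
            if sites.contains j then
              if fs.contains chromo then
                fs.modify chromo PySem.Dict.empty (fun inner => inner.insert j (sites.getD j []))
              else
                (fs.insert chromo PySem.Dict.empty).modify chromo PySem.Dict.empty
                  (fun inner => inner.insert j (sites.getD j []))
            else fs) fs) fs
      else fs) PySem.Dict.empty
  res.items.map (fun p => (p.1, p.2.items))

-- ===== PORT B =====
def get_feature_sites_alt (chromo_sites : List (String × List (Int × List Int))) (feature_coord : List (String × List (List Int))) : List (String × List (Int × List Int)) :=
  let csd : PySem.Dict String (List (Int × List Int)) := PySem.Dict.mk chromo_sites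
  feature_coord.foldl (fun fs p =>
    if csd.contains p.1 then
      let sites : PySem.Dict Int (List Int) := PySem.Dict.mk (csd.getD p.1 [])
      let posSorted := PySem.List.sorted sites.keys (fun x => x) false
      let out : PySem.Dict Int (List Int) :=
        p.2.foldl (fun out iv =>
          let s := PySem.List.pyGetD iv 0 0
          let e := PySem.List.pyGetD iv 1 0
          posSorted.foldl (fun out j =>
            if s ≤ j ∧ j < e then out.insert j (sites.getD j []) else out) out)
          PySem.Dict.empty
      if out.items.isEmpty then fs else fs ++ [(p.1, out.items)]
    else fs) []

-- ===== PRECONDITION & SPEC =====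
-- Pre_ excludes (a) inputs where A raises IndexError (an interval list with fewer than two
-- entries on a chromo present in chromo_sites), and (b) association lists with duplicate
-- keys at either dict level, which no Python dict argument can express.
def Pre_get_feature_sites (chromo_sites : List (String × List (Int × List Int))) (feature_coord : List (String × List (List Int))) : Prop :=
  (feature_coord.map Prod.fst).Nodup ∧
  (chromo_sites.map Prod.fst).Nodup ∧
  (∀ p ∈ chromo_sites, (p.2.map Prod.fst).Nodup) ∧
  (∀ p ∈ feature_coord, (PySem.Dict.mk chromo_sites).contains p.1 = true → ∀ iv ∈ p.2, 2 ≤ iv.length)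
instance (chromo_sites : List (String × List (Int × List Int))) (feature_coord : List (String × List (List Int))) : Decidable (Pre_get_feature_sites chromo_sites feature_coord) := by unfold Pre_get_feature_sites; infer_instance
def pvWitness_get_feature_sites : (List (String × List (Int × List Int))) × (List (String × List (List Int))) :=
  ([("c1", [(3, [5, 0]), (1, [2])])], [("c1", [[1, 4, 1]]), ("c2", [[0]])])
def Spec_get_feature_sites (chromo_sites : List (String × List (Int × List Int))) (feature_coord : List (String × List (List Int))) (out : List (String × List (Int × List Int))) : Prop := out = get_feature_sites_alt chromo_sites feature_coord
instance (chromo_sites : List (String × List (Int × List Int))) (feature_coord : List (String × List (List Int))) (out : List (String × List (Int × List Int))) : Decidable (Spec_get_feature_sites chromo_sites feature_coord out) := by unfold Spec_get_feature_sites; infer_instance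

-- ===== CLAIM (what is proved, stated in full; the proofs are below) =====
def Claim_equal_get_feature_sites : Prop := ∀ (chromo_sites : List (String × List (Int × List Int))) (feature_coord : List (String × List (List Int))), Dom_get_feature_sites chromo_sites feature_coord → Pre_get_feature_sites chromo_sites feature_coord → Spec_get_feature_sites chromo_sites feature_coord (get_feature_sites chromo_sites feature_coord)

-- ===== LEMMAS AND PROOFS =====

theorem pvFoldlFlat {α β γ : Type} (l : List α) (g : α → List β) (f : γ → β → γ) (init : γ) :
    l.foldl (fun acc x => (g x).foldl f acc) init = (l.flatMap g).foldl f init := by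
  induction l generalizing init with
  | nil => rfl
  | cons a t ih => simp [List.foldl_append, ih]

theorem pvPyRangePairwise (a b : Int) : (PySem.List.pyRange a b).Pairwise (· < ·) := by
  simp only [PySem.List.pyRange]
  norm_num
  rw [List.pairwise_map]
  exact List.pairwise_lt_range.imp (by intro k k' h; omega)

theorem pvModifyLast {ν : Type} (pre : List (String × ν)) (c : String) (d dflt : ν) (f : ν → ν)
    (hf : ∀ q ∈ pre, q.1 ≠ c) :
    (PySem.Dict.mk (pre ++ [(c, d)])).modify c dflt f = PySem.Dict.mk (pre ++ [(c, f d)]) := by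
  have hfind : List.find? (fun p => p.1 == c) pre = none := by
    apply List.find?_eq_none.mpr
    intro p hp
    simpa using hf p hp
  have hget : (PySem.Dict.mk (pre ++ [(c, d)])).getD c dflt = d := by
    simp [PySem.Dict.getD, PySem.Dict.get?, List.find?_append, hfind]
  have hcont : (PySem.Dict.mk (pre ++ [(c, d)])).contains c = true := by
    simp [PySem.Dict.contains]
  apply PySem.Dict.ext
  simp only [PySem.Dict.modify, hget, PySem.Dict.insert, hcont, if_pos]
  simp only [List.map_append]
  congr 1
  · refine (List.map_congr_left ?_).trans (List.map_id _)
    intro p hp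
    simp [show p.1 ≠ c from hf p hp]
  · simp

theorem pvSortedStrict (xs : List Int) (hnd : xs.Nodup) :
    (PySem.List.sorted xs (fun x => x) false).Pairwise (· < ·) := by
  have hperm := PySem.List.sorted_perm xs (fun x => x) false
  have hnd' : (PySem.List.sorted xs (fun x => x) false).Nodup := hperm.nodup_iff.mpr hnd
  have hle := PySem.List.sorted_pairwise xs (fun x => x)
  exact (hle.and hnd').imp (fun h => lt_of_le_of_ne h.1 h.2)

-- THE core lemma: positions of [s,e) with coverage, in increasing order, two ways
theorem pvFilterRangeEqFilterSorted (sites : PySem.Dict Int (List Int)) (hnd : sites.keys.Nodup)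
    (s e : Int) :
    (PySem.List.pyRange s e).filter (fun j => sites.contains j) =
      (PySem.List.sorted sites.keys (fun x => x) false).filter (fun j => decide (s ≤ j ∧ j < e)) := by
  have h1 : ((PySem.List.pyRange s e).filter (fun j => sites.contains j)).Pairwise (· < ·) :=
    (pvPyRangePairwise s e).sublist List.filter_sublist
  have h2 : ((PySem.List.sorted sites.keys (fun x => x) false).filter
      (fun j => decide (s ≤ j ∧ j < e))).Pairwise (· < ·) :=
    (pvSortedStrict sites.keys hnd).sublist List.filter_sublist
  have n1 := h1.imp (fun h => Int.ne_of_lt h)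
  have n2 := h2.imp (fun h => Int.ne_of_lt h)
  have hmem : ∀ x, x ∈ (PySem.List.pyRange s e).filter (fun j => sites.contains j) ↔
      x ∈ (PySem.List.sorted sites.keys (fun x => x) false).filter
        (fun j => decide (s ≤ j ∧ j < e)) := by
    intro x
    simp only [List.mem_filter, PySem.List.mem_pyRange_one,
      (PySem.List.sorted_perm sites.keys (fun x => x) false).mem_iff,
      ← PySem.Dict.contains_iff_mem_keys]
    simp only [decide_eq_true_eq]
    tauto
  exact List.Perm.eq_of_pairwise (fun a b _ _ h h' => le_antisymm h h')
    (h1.imp le_of_lt) (h2.imp le_of_lt) ((List.perm_ext_iff_of_nodup n1 n2).mpr hmem)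

def pvIns (sites : PySem.Dict Int (List Int)) (d : PySem.Dict Int (List Int)) (j : Int) :
    PySem.Dict Int (List Int) := d.insert j (sites.getD j [])

def pvStepA (sites : PySem.Dict Int (List Int)) (c : String)
    (fs : PySem.Dict String (PySem.Dict Int (List Int))) (j : Int) :
    PySem.Dict String (PySem.Dict Int (List Int)) :=
  if fs.contains c then fs.modify c PySem.Dict.empty (fun inner => inner.insert j (sites.getD j []))
  else (fs.insert c PySem.Dict.empty).modify c PySem.Dict.empty
    (fun inner => inner.insert j (sites.getD j []))

theorem pvContainsFalse {ν : Type} (pre : List (String × ν)) (c : String)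
    (hf : ∀ q ∈ pre, q.1 ≠ c) : (PySem.Dict.mk pre).contains c = false := by
  simp only [PySem.Dict.contains, List.any_eq_false]
  intro p hp
  simpa using hf p hp

theorem pvInsertFresh {ν : Type} (l : List (String × ν)) (c : String) (v : ν)
    (h : (PySem.Dict.mk l).contains c = false) :
    (PySem.Dict.mk l).insert c v = PySem.Dict.mk (l ++ [(c, v)]) := by
  apply PySem.Dict.ext
  simpa using PySem.Dict.items_insert_of_not_contains _ v h

theorem pvRunPresent (sites : PySem.Dict Int (List Int)) (c : String) (js : List Int) :
    ∀ (pre : List (String × PySem.Dict Int (List Int))) (d : PySem.Dict Int (List Int)),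
      (∀ q ∈ pre, q.1 ≠ c) →
      js.foldl (pvStepA sites c) (PySem.Dict.mk (pre ++ [(c, d)])) =
        PySem.Dict.mk (pre ++ [(c, js.foldl (pvIns sites) d)]) := by
  induction js with
  | nil => intro pre d hf; rfl
  | cons j t ih =>
    intro pre d hf
    have hcont : (PySem.Dict.mk (pre ++ [(c, d)])).contains c = true := by
      simp [PySem.Dict.contains]
    simp only [List.foldl_cons, pvStepA, hcont, if_pos,
      pvModifyLast pre c d PySem.Dict.empty _ hf]
    exact ih pre _ hf

theorem pvRunA (sites : PySem.Dict Int (List Int)) (c : String) (js : List Int)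
    (pre : List (String × PySem.Dict Int (List Int))) (hf : ∀ q ∈ pre, q.1 ≠ c) :
    js.foldl (pvStepA sites c) (PySem.Dict.mk pre) =
      if js = [] then PySem.Dict.mk pre
      else PySem.Dict.mk (pre ++ [(c, js.foldl (pvIns sites) PySem.Dict.empty)]) := by
  cases js with
  | nil => rfl
  | cons j t =>
    have hc0 := pvContainsFalse pre c hf
    simp only [List.foldl_cons, reduceCtorEq, pvStepA, hc0, Bool.false_eq_true]
    rw [if_neg (by simp)]
    rw [pvInsertFresh pre c PySem.Dict.empty hc0,
      pvModifyLast pre c PySem.Dict.empty PySem.Dict.empty _ hf]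
    exact pvRunPresent sites c t pre _ hf

def pvJs (sites : PySem.Dict Int (List Int)) (iv : List Int) : List Int :=
  (PySem.List.pyRange (PySem.List.pyGetD iv 0 0) (PySem.List.pyGetD iv 1 0)).filter
    (fun j => sites.contains j)

-- A's nested interval/position loops, flattened to one run over the hit positions
theorem pvChromoA (sites : PySem.Dict Int (List Int)) (c : String) (feats : List (List Int))
    (pre : List (String × PySem.Dict Int (List Int))) (hf : ∀ q ∈ pre, q.1 ≠ c) :
    feats.foldl (fun fs iv =>
        (PySem.List.pyRange (PySem.List.pyGetD iv 0 0) (PySem.List.pyGetD iv 1 0)).foldl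
          (fun fs j => if sites.contains j then pvStepA sites c fs j else fs) fs)
      (PySem.Dict.mk pre) =
      if feats.flatMap (pvJs sites) = [] then PySem.Dict.mk pre
      else PySem.Dict.mk (pre ++ [(c, (feats.flatMap (pvJs sites)).foldl (pvIns sites)
        PySem.Dict.empty)]) := by
  have h1 : ∀ (fs : PySem.Dict String (PySem.Dict Int (List Int))) (iv : List Int),
      (PySem.List.pyRange (PySem.List.pyGetD iv 0 0) (PySem.List.pyGetD iv 1 0)).foldl
        (fun fs j => if sites.contains j then pvStepA sites c fs j else fs) fs =
        (pvJs sites iv).foldl (pvStepA sites c) fs := by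
    intro fs iv
    exact PySem.List.foldl_if_eq_foldl_filter _ _ _ _
  simp only [h1]
  rw [pvFoldlFlat feats (pvJs sites) (pvStepA sites c) (PySem.Dict.mk pre)]
  exact pvRunA sites c _ pre hf

-- B's nested loops compute the same run over the same hit positions
theorem pvChromoB (sites : PySem.Dict Int (List Int)) (hnd : sites.keys.Nodup)
    (feats : List (List Int)) :
    feats.foldl (fun out iv =>
        (PySem.List.sorted sites.keys (fun x => x) false).foldl
          (fun out j => if PySem.List.pyGetD iv 0 0 ≤ j ∧ j < PySem.List.pyGetD iv 1 0 then
            pvIns sites out j else out) out)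
      PySem.Dict.empty =
      (feats.flatMap (pvJs sites)).foldl (pvIns sites) PySem.Dict.empty := by
  have h1 : ∀ (out : PySem.Dict Int (List Int)) (iv : List Int),
      (PySem.List.sorted sites.keys (fun x => x) false).foldl
        (fun out j => if PySem.List.pyGetD iv 0 0 ≤ j ∧ j < PySem.List.pyGetD iv 1 0 then
          pvIns sites out j else out) out = (pvJs sites iv).foldl (pvIns sites) out := by
    intro out iv
    rw [PySem.List.foldl_ite_eq_foldl_filter _ _ _ _, pvJs,
      pvFilterRangeEqFilterSorted sites hnd]
  simp only [h1]
  exact (pvFoldlFlat feats (pvJs sites) (pvIns sites) PySem.Dict.empty).symm ▸ rfl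

-- the hit dict is empty exactly when there are no hits
theorem pvItemsEmptyIff (sites : PySem.Dict Int (List Int)) (js : List Int) :
    (js.foldl (pvIns sites) PySem.Dict.empty).items.isEmpty = true ↔ js = [] := by
  have hk : (js.foldl (pvIns sites) PySem.Dict.empty).keys = PySem.Set.ofList js := by
    have := PySem.Dict.keys_foldl_insert_key (ν := List Int) js (fun j => j)
      (fun d j => sites.getD j []) PySem.Dict.empty
    simpa [pvIns, PySem.Set.update, PySem.Set.ofList_eq_foldl] using this
  constructor
  · intro h
    cases js with
    | nil => rfl
    | cons j t =>
      exfalso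
      have hj : j ∈ PySem.Set.ofList (j :: t) := (PySem.Set.mem_ofList _ j).mpr (by simp)
      rw [List.isEmpty_iff] at h
      have hkeys : ((j :: t).foldl (pvIns sites) PySem.Dict.empty).keys = [] := by
        show (((j :: t).foldl (pvIns sites) PySem.Dict.empty).items.map Prod.fst) = []
        rw [h]
        rfl
      rw [hkeys] at hk
      rw [← hk] at hj
      simp at hj
  · intro h; subst h; rfl

theorem pvContainsSome {κ ν : Type} [BEq κ] (d : PySem.Dict κ ν) (k : κ)
    (h : d.contains k = true) : ∃ v, d.get? k = some v := by
  simp only [PySem.Dict.contains, List.any_eq_true] at h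
  obtain ⟨p, hp, hb⟩ := h
  cases hf : List.find? (fun q => q.1 == k) d.items with
  | none => exact absurd hb (by simpa using List.find?_eq_none.mp hf p hp)
  | some q => exact ⟨q.2, by simp [PySem.Dict.get?, hf]⟩

theorem pvOuter (cs : List (String × List (Int × List Int)))
    (hsn : ∀ p ∈ cs, (p.2.map Prod.fst).Nodup) :
    ∀ (l : List (String × List (List Int))) (pre : List (String × PySem.Dict Int (List Int))),
      (l.map Prod.fst).Nodup →
      (∀ p ∈ l, ∀ q ∈ pre, q.1 ≠ p.1) →
      ((l.foldl (fun fs p =>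
          if (PySem.Dict.mk cs).contains p.1 then
            p.2.foldl (fun fs iv =>
              (PySem.List.pyRange (PySem.List.pyGetD iv 0 0) (PySem.List.pyGetD iv 1 0)).foldl
                (fun fs j =>
                  if (PySem.Dict.mk ((PySem.Dict.mk cs).getD p.1 [])).contains j then
                    pvStepA (PySem.Dict.mk ((PySem.Dict.mk cs).getD p.1 [])) p.1 fs j
                  else fs) fs) fs
          else fs) (PySem.Dict.mk pre)).items.map (fun q => (q.1, q.2.items)))
      = l.foldl (fun fs p =>
          if (PySem.Dict.mk cs).contains p.1 then
            (if (p.2.foldl (fun out iv =>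
                (PySem.List.sorted (PySem.Dict.mk ((PySem.Dict.mk cs).getD p.1 [])).keys
                    (fun x => x) false).foldl
                  (fun out j =>
                    if PySem.List.pyGetD iv 0 0 ≤ j ∧ j < PySem.List.pyGetD iv 1 0 then
                      pvIns (PySem.Dict.mk ((PySem.Dict.mk cs).getD p.1 [])) out j
                    else out) out)
              PySem.Dict.empty).items.isEmpty then fs
            else fs ++ [(p.1, (p.2.foldl (fun out iv =>
                (PySem.List.sorted (PySem.Dict.mk ((PySem.Dict.mk cs).getD p.1 [])).keys
                    (fun x => x) false).foldl
                  (fun out j =>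
                    if PySem.List.pyGetD iv 0 0 ≤ j ∧ j < PySem.List.pyGetD iv 1 0 then
                      pvIns (PySem.Dict.mk ((PySem.Dict.mk cs).getD p.1 [])) out j
                    else out) out)
              PySem.Dict.empty).items)])
          else fs) (pre.map (fun q => (q.1, q.2.items))) := by
  intro l
  induction l with
  | nil => intro pre _ _; rfl
  | cons p t ih =>
    intro pre hnd hf
    simp only [List.foldl_cons]
    by_cases hc : (PySem.Dict.mk cs).contains p.1 = true
    · rw [if_pos hc, if_pos hc]
      set sites := PySem.Dict.mk ((PySem.Dict.mk cs).getD p.1 []) with hsites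
      have hfp : ∀ q ∈ pre, q.1 ≠ p.1 := fun q hq => hf p (by simp) q hq
      have hndk : sites.keys.Nodup := by
        obtain ⟨v, hv⟩ := pvContainsSome _ _ hc
        have hmem := PySem.Dict.mem_items_of_get?_eq_some _ hv
        have : (PySem.Dict.mk cs).getD p.1 [] = v := by
          simp [PySem.Dict.getD, hv]
        rw [hsites, this]
        exact hsn _ hmem
      rw [pvChromoA sites p.1 p.2 pre hfp, pvChromoB sites hndk p.2]
      by_cases hJ : p.2.flatMap (pvJs sites) = []
      · rw [if_pos hJ, if_pos ((pvItemsEmptyIff sites _).mpr hJ)]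
        exact ih pre (by simpa using hnd.of_cons) (fun p' hp' => hf p' (by simp [hp']))
      · rw [if_neg hJ, if_neg (by simpa using (fun h => hJ ((pvItemsEmptyIff sites _).mp h)))]
        rw [ih (pre ++ [(p.1, (p.2.flatMap (pvJs sites)).foldl (pvIns sites) PySem.Dict.empty)])
          (by simpa using hnd.of_cons) ?_]
        · simp
        · intro p' hp' q hq
          rcases List.mem_append.mp hq with hq | hq
          · exact hf p' (by simp [hp']) q hq
          · simp only [List.mem_singleton] at hq
            subst hq
            simp only [List.map_cons, List.nodup_cons] at hnd
            intro he
            exact hnd.1 (he ▸ List.mem_map_of_mem hp')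
    · rw [if_neg hc, if_neg hc]
      exact ih pre (by simpa using hnd.of_cons) (fun p' hp' => hf p' (by simp [hp']))

def pvF (cs : List (String × List (Int × List Int))) (fc : List (String × List (List Int)))
    (fs : PySem.Dict String (PySem.Dict Int (List Int))) (chromo : String) :
    PySem.Dict String (PySem.Dict Int (List Int)) :=
  if (PySem.Dict.mk cs).contains chromo then
    let feats := (PySem.Dict.mk fc).getD chromo []
    (PySem.List.pyRange 0 (PySem.List.len feats) 1).foldl (fun fs i =>
      let iv := PySem.List.pyGetD feats i []
      (PySem.List.pyRange (PySem.List.pyGetD iv 0 0) (PySem.List.pyGetD iv 1 0) 1).foldl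
        (fun fs j =>
          let sites : PySem.Dict Int (List Int) :=
            PySem.Dict.mk ((PySem.Dict.mk cs).getD chromo [])
          if sites.contains j then
            if fs.contains chromo then
              fs.modify chromo PySem.Dict.empty (fun inner => inner.insert j (sites.getD j []))
            else
              (fs.insert chromo PySem.Dict.empty).modify chromo PySem.Dict.empty
                (fun inner => inner.insert j (sites.getD j []))
          else fs) fs) fs
  else fs

def pvG (cs : List (String × List (Int × List Int)))
    (fs : PySem.Dict String (PySem.Dict Int (List Int))) (p : String × List (List Int)) :
    PySem.Dict String (PySem.Dict Int (List Int)) :=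
  if (PySem.Dict.mk cs).contains p.1 then
    p.2.foldl (fun fs iv =>
      (PySem.List.pyRange (PySem.List.pyGetD iv 0 0) (PySem.List.pyGetD iv 1 0)).foldl
        (fun fs j =>
          if (PySem.Dict.mk ((PySem.Dict.mk cs).getD p.1 [])).contains j then
            pvStepA (PySem.Dict.mk ((PySem.Dict.mk cs).getD p.1 [])) p.1 fs j
          else fs) fs) fs
  else fs

def pvB1 (cs : List (String × List (Int × List Int)))
    (fs : List (String × List (Int × List Int))) (p : String × List (List Int)) :
    List (String × List (Int × List Int)) :=
  if (PySem.Dict.mk cs).contains p.1 then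
    (if (p.2.foldl (fun out iv =>
        (PySem.List.sorted (PySem.Dict.mk ((PySem.Dict.mk cs).getD p.1 [])).keys
            (fun x => x) false).foldl
          (fun out j =>
            if PySem.List.pyGetD iv 0 0 ≤ j ∧ j < PySem.List.pyGetD iv 1 0 then
              pvIns (PySem.Dict.mk ((PySem.Dict.mk cs).getD p.1 [])) out j
            else out) out)
      PySem.Dict.empty).items.isEmpty then fs
    else fs ++ [(p.1, (p.2.foldl (fun out iv =>
        (PySem.List.sorted (PySem.Dict.mk ((PySem.Dict.mk cs).getD p.1 [])).keys
            (fun x => x) false).foldl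
          (fun out j =>
            if PySem.List.pyGetD iv 0 0 ≤ j ∧ j < PySem.List.pyGetD iv 1 0 then
              pvIns (PySem.Dict.mk ((PySem.Dict.mk cs).getD p.1 [])) out j
            else out) out)
      PySem.Dict.empty).items)])
  else fs

theorem pvF_eq_G (cs : List (String × List (Int × List Int)))
    (fc : List (String × List (List Int))) (hfc : (fc.map Prod.fst).Nodup) :
    ∀ (acc : PySem.Dict String (PySem.Dict Int (List Int))), ∀ p ∈ fc,
      pvF cs fc acc p.1 = pvG cs acc p := by
  intro acc p hp
  have hfeats : (PySem.Dict.mk fc).getD p.1 [] = p.2 := by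
    apply PySem.Dict.getD_of_mem_items
    · simpa using hp
    · simpa [PySem.Dict.keys] using hfc
  simp only [pvF, pvG, hfeats]
  by_cases hc : (PySem.Dict.mk cs).contains p.1 = true
  · rw [if_pos hc, if_pos hc]
    rw [PySem.List.foldl_pyRange_pyGetD p.2 ([] : List Int)
      (fun fs iv =>
        (PySem.List.pyRange (PySem.List.pyGetD iv 0 0) (PySem.List.pyGetD iv 1 0)).foldl
          (fun fs j =>
            if (PySem.Dict.mk ((PySem.Dict.mk cs).getD p.1 [])).contains j then
              if fs.contains p.1 then
                fs.modify p.1 PySem.Dict.empty (fun inner =>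
                  inner.insert j ((PySem.Dict.mk ((PySem.Dict.mk cs).getD p.1 [])).getD j []))
              else
                (fs.insert p.1 PySem.Dict.empty).modify p.1 PySem.Dict.empty (fun inner =>
                  inner.insert j ((PySem.Dict.mk ((PySem.Dict.mk cs).getD p.1 [])).getD j []))
            else fs) fs) acc (by norm_num : (0:Int) ≤ 0)]
    rfl
  · rw [if_neg hc, if_neg hc]

theorem pvMain (cs : List (String × List (Int × List Int))) (fc : List (String × List (List Int)))
    (hfc : (fc.map Prod.fst).Nodup) (hsn : ∀ p ∈ cs, (p.2.map Prod.fst).Nodup) :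
    get_feature_sites cs fc = get_feature_sites_alt cs fc := by
  have h0 : get_feature_sites cs fc =
      ((fc.map Prod.fst).foldl (pvF cs fc) (PySem.Dict.mk [])).items.map
        (fun q => (q.1, q.2.items)) := rfl
  have h9 : get_feature_sites_alt cs fc = fc.foldl (pvB1 cs) [] := rfl
  rw [h0, h9, List.foldl_map]
  rw [PySem.List.foldl_congr_mem fc _ (pvG cs) (PySem.Dict.mk [])
    (fun acc p hp => pvF_eq_G cs fc hfc acc p hp)]
  have := pvOuter cs hsn fc [] hfc (by simp)
  exact this

-- ===== VERDICT (by name: the statement is the Claim_ definition above) =====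
theorem get_feature_sites_spec : Claim_equal_get_feature_sites := by
  intro chromo_sites feature_coord _ hpre
  unfold Spec_get_feature_sites
  exact pvMain chromo_sites feature_coord hpre.1 hpre.2.2.1
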